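-- pv_equiv track=rewrite | github.com/SakuraMathcraft/LaTeXSnipper | src/core/mathcraft_tex_exporter.py | _unmatched_open_brace_positions
-- ===== SOURCE A (Python) =====
-- def _unmatched_open_brace_positions(text: str) -> list[int]:
--     stack: list[int] = []
--     for idx, ch in enumerate(text):
--         if _is_escaped_at(text, idx):
--             continue
--         if ch == "{":
--             stack.append(idx)
--         elif ch == "}" and stack:
--             stack.pop()
--     return stack
--
-- def _is_escaped_at(text: str, idx: int) -> bool:
--     slash_count = 0
--     pos = idx - 1
--     while pos >= 0 and text[pos] == "\\":
--         slash_count += 1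
--         pos -= 1
--     return slash_count % 2 == 1
-- ===== SOURCE B (Python) =====
-- def _unmatched_open_brace_positions(text: str) -> list[int]:
--     stack: list[int] = []
--     esc = False  # is the current character escaped?
--     for idx, ch in enumerate(text):
--         if not esc:
--             if ch == "{":
--                 stack.append(idx)
--             elif ch == "}" and stack:
--                 stack.pop()
--         esc = (ch == "\\") and not esc
--     return stack
-- ===== Notes on version B (the rewrite author's own statement) =====
-- stated objective: faster
-- what changed: B replaces A's per-index backward rescan of preceding backslashes with a single forward pass that carries one escape-parity bit, updated in O(1) per character.
import Mathlib
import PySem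

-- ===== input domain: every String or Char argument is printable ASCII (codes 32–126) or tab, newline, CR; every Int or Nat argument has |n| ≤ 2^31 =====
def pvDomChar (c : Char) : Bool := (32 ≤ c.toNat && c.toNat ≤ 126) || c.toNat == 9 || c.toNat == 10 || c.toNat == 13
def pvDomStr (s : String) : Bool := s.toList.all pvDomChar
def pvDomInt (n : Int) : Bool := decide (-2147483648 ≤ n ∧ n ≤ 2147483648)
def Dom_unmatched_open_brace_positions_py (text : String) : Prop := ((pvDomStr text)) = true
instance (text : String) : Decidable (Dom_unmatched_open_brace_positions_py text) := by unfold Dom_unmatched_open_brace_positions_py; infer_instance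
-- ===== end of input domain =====

-- B replaces A's per-index backward rescan of preceding backslashes with a single
-- forward pass carrying one escape-parity bit (objective: faster, asymptotic).

-- ===== PORT A =====
-- _is_escaped_at's while loop walks pos = idx-1, idx-2, … while text[pos] == '\\';
-- ported as recursion on pos+1 (argument n stands for pos+1; n = 0 is pos < 0).
-- text[pos] is always in range here (0 ≤ pos < idx ≤ len), so getD is exact.
def pvSlashRun (cs : List Char) : Nat → Nat
  | 0 => 0
  | n + 1 => if cs.getD n ' ' = '\\' then pvSlashRun cs n + 1 else 0

def pvIsEscapedAt (cs : List Char) (idx : Int) : Bool :=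
  pvSlashRun cs idx.toNat % 2 == 1

-- the body of A's for-loop over enumerate(text)
def pvAStep (cs : List Char) (stack : List Int) (p : Int × Char) : List Int :=
  if pvIsEscapedAt cs p.1 then stack
  else if p.2 == '{' then stack ++ [p.1]
  else if p.2 == '}' && !stack.isEmpty then stack.dropLast
  else stack

def unmatched_open_brace_positions_py (text : String) : List Int :=
  (PySem.List.enumerate text.toList 0).foldl (pvAStep text.toList) []

-- ===== PORT B =====
-- single pass: esc says whether the current character is escaped
def pvAltLoop : List Char → Int → Bool → List Int → List Int
  | [], _, _, stack => stack
  | c :: rest, idx, esc, stack =>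
      pvAltLoop rest (idx + 1) ((c == '\\') && !esc)
        (if esc then stack
         else if c == '{' then stack ++ [idx]
         else if c == '}' && !stack.isEmpty then stack.dropLast
         else stack)

def unmatched_open_brace_positions_py_alt (text : String) : List Int :=
  pvAltLoop text.toList 0 false []

-- ===== PRECONDITION & SPEC =====
def Spec_unmatched_open_brace_positions_py (text : String) (out : List Int) : Prop := out = unmatched_open_brace_positions_py_alt text
instance (text : String) (out : List Int) : Decidable (Spec_unmatched_open_brace_positions_py text out) := by unfold Spec_unmatched_open_brace_positions_py; infer_instance

-- ===== CLAIM (what is proved, stated in full; the proofs are below) =====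
def Claim_equal_unmatched_open_brace_positions_py : Prop := ∀ (text : String), Dom_unmatched_open_brace_positions_py text → Spec_unmatched_open_brace_positions_py text (unmatched_open_brace_positions_py text)

-- ===== LEMMAS AND PROOFS =====

theorem pvGetD_append_length (pre : List Char) (c : Char) (rest : List Char) :
    (pre ++ c :: rest).getD pre.length ' ' = c := by
  induction pre with
  | nil => rfl
  | cons x xs ih => simp only [List.cons_append, List.length_cons, List.getD_cons_succ]; exact ih

-- the slash run ending before index n+1 in terms of the run before index n
theorem pvIsEscapedAt_succ (pre : List Char) (c : Char) (rest : List Char) :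
    pvIsEscapedAt (pre ++ c :: rest) ((pre.length : Int) + 1)
      = ((c == '\\') && !(pvIsEscapedAt (pre ++ c :: rest) (pre.length : Int))) := by
  have h1 : ((pre.length : Int) + 1).toNat = pre.length + 1 := by omega
  have h0 : ((pre.length : Int)).toNat = pre.length := by omega
  simp only [pvIsEscapedAt, h0, h1, pvSlashRun, pvGetD_append_length]
  by_cases hc : c = '\\'
  · subst hc
    rcases Nat.mod_two_eq_zero_or_one (pvSlashRun (pre ++ '\\' :: rest) pre.length) with h | h <;>
      simp [Nat.add_mod, h]
  · simp [hc]

theorem pvKey : ∀ (suf pre : List Char) (stack : List Int),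
    (PySem.List.enumerate suf (pre.length : Int)).foldl (pvAStep (pre ++ suf)) stack
      = pvAltLoop suf (pre.length : Int) (pvIsEscapedAt (pre ++ suf) (pre.length : Int)) stack := by
  intro suf
  induction suf with
  | nil => intro pre stack; simp [PySem.List.enumerate_nil, pvAltLoop]
  | cons c rest ih =>
      intro pre stack
      rw [PySem.List.enumerate_cons]
      have hpre : (pre ++ [c]) ++ rest = pre ++ c :: rest := by simp
      have hlen : ((pre ++ [c]).length : Int) = (pre.length : Int) + 1 := by simp
      have := ih (pre ++ [c]) (if pvIsEscapedAt (pre ++ c :: rest) (pre.length : Int) then stack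
         else if c == '{' then stack ++ [(pre.length : Int)]
         else if c == '}' && !stack.isEmpty then stack.dropLast
         else stack)
      rw [hpre, hlen] at this
      simp only [List.foldl_cons, pvAltLoop, pvAStep]
      rw [this, pvIsEscapedAt_succ]

-- ===== VERDICT (by name: the statement is the Claim_ definition above) =====
theorem unmatched_open_brace_positions_py_spec : Claim_equal_unmatched_open_brace_positions_py := by
  intro text _
  unfold Spec_unmatched_open_brace_positions_py unmatched_open_brace_positions_py
    unmatched_open_brace_positions_py_alt
  have := pvKey text.toList [] []
  simp [pvIsEscapedAt, pvSlashRun] at this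
  simpa using this
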